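-- pv_equiv track=rewrite | github.com/rrtucci/SentenceAx | utils_tree.py | get_all_nodes
-- ===== SOURCE A (Python) =====
-- def get_all_nodes(polytree):
--     """
--     This method returns a list of all nodes of polytree `polytree`.
--
--     This method works whether polytree has empty leafs or not. If it does,
--     empty leaf nodes are not included in output list.
--
--     Parameters
--     ----------
--     polytree: dict[str, list[str]]
--
--     Returns
--     -------
--     list[str]
--
--     """
--     all_nodes = []
--     for parent, children in polytree.items():
--         if parent not in all_nodes:
--             all_nodes.append(parent)
--         for child in children:
--             if child and child not in all_nodes:
--                 all_nodes.append(child)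
--     return all_nodes
-- ===== SOURCE B (Python) =====
-- def get_all_nodes(polytree):
--     # build the full ordered candidate sequence, then dedup it by a sieve:
--     # repeatedly take the head and delete all its later duplicates
--     seq = [n for parent, children in polytree.items()
--            for n in [parent] + [c for c in children if c]]
--     out = []
--     while seq:
--         head = seq[0]
--         out.append(head)
--         seq = [x for x in seq[1:] if x != head]
--     return out
-- ===== Notes on version B (the rewrite author's own statement) =====
-- stated objective: alternative
-- what changed: A dedups check-as-you-go by scanning a growing accumulator inside nested loops; B first builds the full ordered candidate sequence (parent unconditionally, truthy children) and then dedups it by a recursive sieve that keeps the head and deletes all its later duplicates from the tail before recursing - no accumulator and no membership test against the result.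
import Mathlib
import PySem

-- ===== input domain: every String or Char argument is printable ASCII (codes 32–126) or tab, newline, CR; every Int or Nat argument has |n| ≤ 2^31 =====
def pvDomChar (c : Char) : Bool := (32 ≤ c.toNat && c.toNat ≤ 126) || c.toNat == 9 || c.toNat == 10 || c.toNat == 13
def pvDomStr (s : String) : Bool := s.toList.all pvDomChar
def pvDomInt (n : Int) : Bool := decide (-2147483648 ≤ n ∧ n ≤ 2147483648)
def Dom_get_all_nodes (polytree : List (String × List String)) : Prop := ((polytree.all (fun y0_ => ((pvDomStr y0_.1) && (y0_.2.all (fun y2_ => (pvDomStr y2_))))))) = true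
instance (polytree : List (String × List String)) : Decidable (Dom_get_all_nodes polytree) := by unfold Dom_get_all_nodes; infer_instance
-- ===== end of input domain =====

-- B builds the ordered candidate sequence and dedups it by a head-sieve (repeatedly drop the head's later duplicates); A dedups check-as-you-go with an accumulator scan. Return values proved equal.

-- ===== PORT A =====
-- literal transliteration: outer loop over items, append parent if unseen, inner loop appending truthy unseen children
def get_all_nodes (polytree : List (String × List String)) : List String :=
  polytree.foldl
    (fun all_nodes pc =>
      let all_nodes := if pc.1 ∈ all_nodes then all_nodes else all_nodes ++ [pc.1]
      pc.2.foldl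
        (fun all_nodes child =>
          if child ≠ "" ∧ child ∉ all_nodes then all_nodes ++ [child] else all_nodes)
        all_nodes)
    []

-- ===== PORT B =====
-- literal transliteration of Source B's sieve loop (while seq: take head, filter its duplicates out of the rest)
def pvSieve : List String → List String
  | [] => []
  | head :: rest => head :: pvSieve (rest.filter (fun x => x ≠ head))
termination_by l => l.length
decreasing_by simpa using (List.length_filter_le _ rest.attach).trans_eq (List.length_attach)

def get_all_nodes_alt (polytree : List (String × List String)) : List String :=
  pvSieve (polytree.flatMap (fun pc => [pc.1] ++ pc.2.filter (fun c => c ≠ "")))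

-- ===== PRECONDITION & SPEC =====
def Spec_get_all_nodes (polytree : List (String × List String)) (out : List String) : Prop := out = get_all_nodes_alt polytree
instance (polytree : List (String × List String)) (out : List String) : Decidable (Spec_get_all_nodes polytree out) := by unfold Spec_get_all_nodes; infer_instance

-- ===== CLAIM =====
def Claim_equal_get_all_nodes : Prop := ∀ (polytree : List (String × List String)), Dom_get_all_nodes polytree → Spec_get_all_nodes polytree (get_all_nodes polytree)

-- ===== LEMMAS AND PROOFS =====

-- A's inner loop over the children is Set.update with the truthy children
theorem inner_eq_update (cs : List String) (acc : List String) :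
    cs.foldl (fun all_nodes child =>
        if child ≠ "" ∧ child ∉ all_nodes then all_nodes ++ [child] else all_nodes) acc
      = PySem.Set.update acc (cs.filter (fun child => child ≠ "")) := by
  induction cs generalizing acc with
  | nil => rfl
  | cons c cs ih =>
    rw [List.foldl_cons, List.filter_cons]
    by_cases hc : c = ""
    · rw [if_neg (fun h => h.1 hc), if_neg (by simp [hc])]
      exact ih acc
    · have he : (if c ≠ "" ∧ c ∉ acc then acc ++ [c] else acc)
          = if c ∈ acc then acc else acc ++ [c] := by
        by_cases hm : c ∈ acc <;> simp [hm, hc]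
      rw [if_pos (decide_eq_true hc), PySem.Set.update_cons, PySem.Set.add_eq_ite, he]
      exact ih _

-- A's whole loop is Set.update of the accumulator with the candidate sequence
theorem a_fold_eq_update (pt : List (String × List String)) (acc : List String) :
    pt.foldl
      (fun all_nodes pc =>
        pc.2.foldl
          (fun all_nodes child =>
            if child ≠ "" ∧ child ∉ all_nodes then all_nodes ++ [child] else all_nodes)
          (if pc.1 ∈ all_nodes then all_nodes else all_nodes ++ [pc.1])) acc
      = PySem.Set.update acc (pt.flatMap (fun pc => [pc.1] ++ pc.2.filter (fun child => child ≠ ""))) := by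
  induction pt generalizing acc with
  | nil => rfl
  | cons p ps ih =>
    simp only [List.foldl_cons, List.flatMap_cons]
    rw [PySem.Set.update_append, List.singleton_append, PySem.Set.update_cons]
    rw [ih, inner_eq_update, PySem.Set.add_eq_ite]

-- check-as-you-go dedup onto acc equals acc followed by the sieve of the not-yet-seen elements
theorem update_eq_append_sieve (l : List String) (acc : List String) :
    PySem.Set.update acc l = acc ++ pvSieve (l.filter (fun x => x ∉ acc)) := by
  induction l generalizing acc with
  | nil => simp [PySem.Set.update, pvSieve]
  | cons h t ih =>
    rw [PySem.Set.update_cons, PySem.Set.add_eq_ite, List.filter_cons]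
    by_cases hm : h ∈ acc
    · rw [if_pos hm, if_neg (by simp [hm]), ih]
    · rw [if_neg hm, if_pos (by simp [hm]), ih]
      simp only [pvSieve, List.filter_filter]
      have : ∀ x : String, ((x ≠ h : Bool) && (x ∉ acc : Bool)) = (x ∉ acc ++ [h] : Bool) := by
        intro x; by_cases h1 : x = h <;> by_cases h2 : x ∈ acc <;> simp [h1, h2]
      simp only [this]
      simp

-- ===== VERDICT =====
theorem get_all_nodes_spec : Claim_equal_get_all_nodes := by
  intro pt _
  show get_all_nodes pt = get_all_nodes_alt pt
  rw [get_all_nodes, a_fold_eq_update, update_eq_append_sieve]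
  simp [get_all_nodes_alt]
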